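-- pv_equiv track=rewrite | github.com/ftumpa001/ARP-MLCS | Code/reorder.py | build_suffix_lcs_table
-- ===== SOURCE A (Python) =====
-- def build_suffix_lcs_table(a: str, b: str):
--     n, m = len(a), len(b)
--     L = [[0]*(m+1) for _ in range(n+1)]
--     for i in range(n-1, -1, -1):
--         for j in range(m-1, -1, -1):
--             if a[i] == b[j]:
--                 L[i][j] = L[i+1][j+1] + 1
--             else:
--                 L[i][j] = max(L[i+1][j], L[i][j+1])
--     return L
-- ===== SOURCE B (Python) =====
-- def build_suffix_lcs_table(a: str, b: str):
--     # Different recurrence: each row is computed from the row BELOW it alone, by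
--     # matching a[i] against the FIRST occurrence p of a[i] in b[j:]:
--     #   L[i][j] = below[j]                       if a[i] does not occur in b[j:]
--     #   L[i][j] = max(below[j], 1 + below[p+1])  otherwise,
--     # which is correct because an optimal common subsequence that uses a[i] may
--     # always match it to its first occurrence (below[] is nonincreasing).
--     # No intra-row dependency and no per-cell three-way DP case split.
--     m = len(b)
--     rows = [[0] * (m + 1)]
--     for c in reversed(a):
--         below = rows[-1]
--         acc = [0]     # entry for j = m
--         best = None   # best = below[p+1] for the first occurrence p >= j of c in b, if any
--         for j in range(m - 1, -1, -1):
--             if b[j] == c: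
--                 best = below[j + 1]
--             acc.append(below[j] if best is None else max(below[j], 1 + best))
--         acc.reverse()
--         rows.append(acc)
--     rows.reverse()
--     return rows
-- ===== Notes on version B (the rewrite author's own statement) =====
-- stated objective: alternative
-- what changed: B replaces A's three-case per-cell DP recurrence (diagonal match plus max over right/below neighbours, with an intra-row dependency) by a different recurrence: each row is computed from the row below it ALONE by matching a[i] to the FIRST occurrence p of a[i] in b[j:] (L[i][j] = max(below[j], 1+below[p+1]), or below[j] if none), maintained by a running best-match value; correctness rests on the first-occurrence-optimality lemma for LCS, proved in the Lean file.
import Mathlib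
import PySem

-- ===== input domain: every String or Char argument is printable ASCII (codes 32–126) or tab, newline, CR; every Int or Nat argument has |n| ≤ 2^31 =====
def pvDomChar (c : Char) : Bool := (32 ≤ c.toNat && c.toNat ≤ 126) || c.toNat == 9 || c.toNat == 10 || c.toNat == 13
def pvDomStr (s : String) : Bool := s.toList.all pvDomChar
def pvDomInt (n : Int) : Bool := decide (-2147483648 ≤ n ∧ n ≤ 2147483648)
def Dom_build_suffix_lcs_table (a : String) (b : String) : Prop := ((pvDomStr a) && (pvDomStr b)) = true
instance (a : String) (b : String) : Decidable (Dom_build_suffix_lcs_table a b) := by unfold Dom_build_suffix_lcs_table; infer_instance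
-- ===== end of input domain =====

-- B replaces A's per-cell three-case DP recurrence by a different one: each row is
-- computed from the row below it alone, matching a[i] to the first occurrence of a[i]
-- in b[j:] via a running best-match value (objective: alternative, same O(n*m) cost).

-- ===== PORT A =====
-- inner-loop body of A: 'L[i][j] = L[i+1][j+1]+1 if a[i]==b[j] else max(L[i+1][j], L[i][j+1])'.
-- All indices used are in range in every reachable state, so the pyGetD defaults are never read;
-- a[i] == b[j] is the Option-level equality of pyGet?, exact here since both are always 'some'.
def pvAstep (al bl : List Char) (i : Int) (L : List (List Int)) (j : Int) : List (List Int) :=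
  let v : Int :=
    if PySem.List.pyGet? al i == PySem.List.pyGet? bl j then
      PySem.List.pyGetD (PySem.List.pyGetD L (i + 1) []) (j + 1) 0 + 1
    else
      max (PySem.List.pyGetD (PySem.List.pyGetD L (i + 1) []) j 0)
          (PySem.List.pyGetD (PySem.List.pyGetD L i []) (j + 1) 0)
  PySem.List.pySetD L i (PySem.List.pySetD (PySem.List.pyGetD L i []) j v)

-- 'for j in range(m-1, -1, -1)'
def pvAouter (al bl : List Char) (L : List (List Int)) (i : Int) : List (List Int) :=
  (PySem.List.pyRange ((bl.length : Int) - 1) (-1) (-1)).foldl (pvAstep al bl i) L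

-- 'L = [[0]*(m+1) for _ in range(n+1)]; for i in range(n-1, -1, -1): …'
def build_suffix_lcs_table (a : String) (b : String) : List (List Int) :=
  (PySem.List.pyRange ((a.toList.length : Int) - 1) (-1) (-1)).foldl
    (pvAouter a.toList b.toList)
    (List.replicate (a.toList.length + 1) (List.replicate (b.toList.length + 1) (0 : Int)))

-- ===== PORT B =====
-- inner-loop body of B: 'if b[j] == c: best = below[j+1]' then
-- 'acc.append(below[j] if best is None else max(below[j], 1 + best))'.
-- b[j] is always in range here, so pyGetD's defaults are never read.
def pvBrowStep (bl : List Char) (below : List Int) (c : Char) (st : List Int × Option Int) (j : Int) : List Int × Option Int :=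
  let best := if PySem.List.pyGet? bl j == some c then some (PySem.List.pyGetD below (j + 1) 0) else st.2
  (st.1 ++ [best.elim (PySem.List.pyGetD below j 0)
            (fun v => max (PySem.List.pyGetD below j 0) (1 + v))], best)

-- 'acc = [0]; best = None; for j in range(m-1, -1, -1): …; acc.reverse()'
def pvBrow (bl : List Char) (below : List Int) (c : Char) : List Int :=
  ((PySem.List.pyRange ((bl.length : Int) - 1) (-1) (-1)).foldl (pvBrowStep bl below c)
    ([(0 : Int)], none)).1.reverse

-- loop body of 'for c in reversed(a): below = rows[-1]; …; rows.append(acc)'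
def pvBstepB (bl : List Char) (rows : List (List Int)) (c : Char) : List (List Int) :=
  rows ++ [pvBrow bl ((PySem.List.pyGet? rows (-1)).getD []) c]

-- 'rows = [[0]*(m+1)]; for c in reversed(a): …; rows.reverse(); return rows'
def build_suffix_lcs_table_alt (a : String) (b : String) : List (List Int) :=
  ((a.toList.reverse).foldl (pvBstepB b.toList)
    [List.replicate (b.toList.length + 1) (0 : Int)]).reverse

-- ===== PRECONDITION & SPEC =====
def Spec_build_suffix_lcs_table (a : String) (b : String) (out : List (List Int)) : Prop := out = build_suffix_lcs_table_alt a b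
instance (a : String) (b : String) (out : List (List Int)) : Decidable (Spec_build_suffix_lcs_table a b out) := by unfold Spec_build_suffix_lcs_table; infer_instance

-- ===== CLAIM (what is proved, stated in full; the proofs are below) =====
def Claim_equal_build_suffix_lcs_table : Prop := ∀ (a : String) (b : String), Dom_build_suffix_lcs_table a b → Spec_build_suffix_lcs_table a b (build_suffix_lcs_table a b)

-- ===== LEMMAS AND PROOFS =====

-- mathematical LCS length of two character lists (standard recursion)
def lcsN : List Char → List Char → Nat
  | [], _ => 0
  | _ :: _, [] => 0
  | x :: xs, y :: ys => if x = y then lcsN xs ys + 1 else max (lcsN xs (y :: ys)) (lcsN (x :: xs) ys)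
termination_by xs ys => xs.length + ys.length

theorem lcsN_nil_left (ys : List Char) : lcsN [] ys = 0 := by rw [lcsN]

theorem lcsN_nil_right (xs : List Char) : lcsN xs [] = 0 := by
  cases xs <;> rw [lcsN]

theorem lcsN_cons_cons (x y : Char) (xs ys : List Char) :
    lcsN (x :: xs) (y :: ys)
      = if x = y then lcsN xs ys + 1 else max (lcsN xs (y :: ys)) (lcsN (x :: xs) ys) := by
  rw [lcsN]

-- the four monotonicity facts, proved together by strong induction on total length
theorem lcs_master : ∀ (N : Nat) (xs ys : List Char), xs.length + ys.length ≤ N →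
    (∀ x, lcsN xs ys ≤ lcsN (x :: xs) ys) ∧ (∀ y, lcsN xs ys ≤ lcsN xs (y :: ys)) ∧
    (∀ x, lcsN (x :: xs) ys ≤ lcsN xs ys + 1) ∧ (∀ y, lcsN xs (y :: ys) ≤ lcsN xs ys + 1) := by
  intro N
  induction N with
  | zero =>
    intro xs ys h
    have hx : xs = [] := by cases xs <;> simp_all
    have hy : ys = [] := by cases ys <;> simp_all
    subst hx; subst hy
    refine ⟨?_, ?_, ?_, ?_⟩ <;> intro z <;>
      simp [lcsN_nil_left, lcsN_nil_right]
  | succ N ih =>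
    intro xs ys h
    refine ⟨?_, ?_, ?_, ?_⟩
    · -- M1': lcsN xs ys ≤ lcsN (x::xs) ys
      intro x
      cases ys with
      | nil => simp [lcsN_nil_right]
      | cons z zs =>
        rw [lcsN_cons_cons]
        by_cases hxz : x = z
        · subst hxz
          rw [if_pos rfl]
          exact (ih xs zs (by simp at h; omega)).2.2.2 x
        · rw [if_neg hxz]
          exact le_max_left _ _
    · -- M1: lcsN xs ys ≤ lcsN xs (y::ys)
      intro y
      cases xs with
      | nil => simp [lcsN_nil_left]
      | cons x xs' =>
        rw [lcsN_cons_cons]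
        by_cases hxy : x = y
        · subst hxy
          rw [if_pos rfl]
          exact (ih xs' ys (by simp at h; omega)).2.2.1 x
        · rw [if_neg hxy]
          exact le_max_right _ _
    · -- M2: lcsN (x::xs) ys ≤ lcsN xs ys + 1
      intro x
      cases ys with
      | nil => simp [lcsN_nil_right]
      | cons z zs =>
        rw [lcsN_cons_cons]
        have hM1 := (ih xs zs (by simp at h; omega)).2.1 z
        have hM2 := (ih xs zs (by simp at h; omega)).2.2.1 x
        by_cases hxz : x = z
        · subst hxz
          rw [if_pos rfl]
          omega
        · rw [if_neg hxz]
          exact max_le (by omega) (by omega)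
    · -- M2': lcsN xs (y::ys) ≤ lcsN xs ys + 1
      intro y
      cases xs with
      | nil => simp [lcsN_nil_left]
      | cons x xs' =>
        rw [lcsN_cons_cons]
        have hM1' := (ih xs' ys (by simp at h; omega)).1 x
        have hM2' := (ih xs' ys (by simp at h; omega)).2.2.2 y
        by_cases hxy : x = y
        · subst hxy
          rw [if_pos rfl]
          omega
        · rw [if_neg hxy]
          exact max_le (by omega) (by omega)

theorem lcsN_le_cons_right (xs ys : List Char) (y : Char) : lcsN xs ys ≤ lcsN xs (y :: ys) :=
  (lcs_master (xs.length + ys.length) xs ys le_rfl).2.1 y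

theorem lcsN_cons_right_le (xs ys : List Char) (y : Char) : lcsN xs (y :: ys) ≤ lcsN xs ys + 1 :=
  (lcs_master (xs.length + ys.length) xs ys le_rfl).2.2.2 y

-- value of 'below' at one past the first occurrence of c in t, if c occurs in t
def obestN (c : Char) (al : List Char) : List Char → Option Nat
  | [] => none
  | y :: ys => if y = c then some (lcsN al ys) else obestN c al ys

-- first-occurrence optimality: B's cell formula equals the LCS recurrence value
theorem entry_spec (c : Char) (al : List Char) : ∀ t : List Char,
    (obestN c al t).elim (lcsN al t) (fun v => max (lcsN al t) (1 + v)) = lcsN (c :: al) t := by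
  intro t
  induction t with
  | nil => simp [obestN, lcsN_nil_right]
  | cons y ys ih =>
    rw [lcsN_cons_cons]
    by_cases hcy : c = y
    · subst hcy
      have h2 := lcsN_cons_right_le al ys c
      simp only [obestN, if_true, Option.elim_some]
      omega
    · have hyc : ¬ y = c := fun hh => hcy hh.symm
      have hmono := lcsN_le_cons_right al ys y
      rw [if_neg hcy]
      simp only [obestN, if_neg hyc]
      cases hb : obestN c al ys with
      | none =>
        rw [hb] at ih
        simp only [Option.elim_none] at ih ⊢
        omega
      | some v =>
        rw [hb] at ih
        simp only [Option.elim_some] at ih ⊢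
        omega

-- the row of suffix-LCS values: specRow al bl !j = LCS(al, bl[j:])
def specRow (al bl : List Char) : List Int :=
  (List.range (bl.length + 1)).map (fun j => ((lcsN al (bl.drop j) : Nat) : Int))

theorem specRow_nil_left (bl : List Char) : specRow [] bl = List.replicate (bl.length + 1) 0 := by
  apply List.ext_getElem <;> simp [specRow, lcsN_nil_left]

theorem specRow_cons (al : List Char) (y : Char) (ys : List Char) :
    specRow al (y :: ys) = ((lcsN al (y :: ys) : Nat) : Int) :: specRow al ys := by
  simp [specRow, List.range_succ_eq_map, List.map_map, Function.comp]

theorem specRow_headI (al bl : List Char) : (specRow al bl).headI = ((lcsN al bl : Nat) : Int) := by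
  cases bl with
  | nil => simp [specRow]
  | cons y ys => rw [specRow_cons]; rfl

theorem specRow_getElem (al bl : List Char) (j : Nat) (h : j < bl.length + 1) :
    (specRow al bl)[j]'(by simp [specRow]; omega) = ((lcsN al (bl.drop j) : Nat) : Int) := by
  simp [specRow]

theorem specRow_get (al bl : List Char) (j : Nat) (h : j ≤ bl.length) :
    PySem.List.pyGetD (specRow al bl) (j : Int) 0 = ((lcsN al (bl.drop j) : Nat) : Int) := by
  have hlen : j < (specRow al bl).length := by simp [specRow]; omega
  simp only [PySem.List.pyGetD, PySem.List.pyGet?_natCast, List.getElem?_eq_getElem hlen,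
    Option.getD_some]
  exact specRow_getElem al bl j (by omega)

theorem specRow_drop_len (al bl : List Char) : (specRow al bl).drop bl.length = [0] := by
  induction bl with
  | nil => simp [specRow, lcsN_nil_right]
  | cons y ys ih => rw [specRow_cons]; simpa using ih

-- ===== A's reference shape (backward row fill) =====

-- reference backward row: fRow c bl next = A's row i, given row i+1 = next
def fRow (c : Char) : List Char → List Int → List Int
  | [], _ => [0]
  | x :: bs, next =>
    let rest := fRow c bs next.tail
    (if c == x then next.tail.headI + 1 else max next.headI rest.headI) :: rest

-- reference table [L[0], …, L[n]]
def tblA (bl : List Char) : List Char → List (List Int)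
  | [] => [List.replicate (bl.length + 1) 0]
  | c :: al => fRow c bl (tblA bl al).headI :: tblA bl al

theorem length_fRow (c : Char) (bs : List Char) (next : List Int) :
    (fRow c bs next).length = bs.length + 1 := by
  induction bs generalizing next with
  | nil => simp [fRow]
  | cons x bs ih => simp [fRow, ih]

theorem tblA_ne_nil (bl al : List Char) : tblA bl al ≠ [] := by
  cases al <;> simp [tblA]

theorem length_headI_tblA (bl al : List Char) : (tblA bl al).headI.length = bl.length + 1 := by
  cases al with
  | nil => simp [tblA]
  | cons c al => simp [tblA, length_fRow]

-- bridge: Python xs[t] (t : Nat, default 0) as head of drop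
theorem pyGetD_drop_headI (xs : List Int) (t : Nat) :
    PySem.List.pyGetD xs (t : Int) 0 = (xs.drop t).headI := by
  induction xs generalizing t with
  | nil => simp [PySem.List.pyGetD, PySem.List.pyGet?]
  | cons x xs ih =>
    cases t with
    | zero => simp
    | succ t =>
      have h1 : ((t + 1 : Nat) : Int) = (t : Int) + 1 := by push_cast; ring
      have h2 : PySem.List.pyGetD (x :: xs) ((t : Int) + 1) 0 = PySem.List.pyGetD xs (t : Int) 0 := by
        simp [PySem.List.pyGetD, PySem.List.pyGet?_cons_succ]
      rw [h1, h2, ih]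
      simp

-- ===== A port = tblA =====

theorem set_append_cons (P : List (List Int)) (r : List Int) (rest : List (List Int)) (v : List Int) :
    (P ++ r :: rest).set P.length v = P ++ v :: rest := by
  induction P with
  | nil => simp
  | cons p P ih => simp [ih]

theorem set_append_cons' (P : List Int) (r : Int) (rest : List Int) (v : Int) :
    (P ++ r :: rest).set P.length v = P ++ v :: rest := by
  induction P with
  | nil => simp
  | cons p P ih => simp [ih]

-- inner loop invariant: the fold from stage t fills row i up to fRow c bl next
theorem inner_step (c : Char) (al bl : List Char) (next : List Int) (P rest : List (List Int)) (t : Nat)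
    (hc : PySem.List.pyGet? al (P.length : Int) = some c)
    (ht : t < bl.length) :
    pvAstep al bl (P.length : Int)
      (P ++ (List.replicate (t + 1) 0 ++ fRow c (bl.drop (t + 1)) (next.drop (t + 1))) :: next :: rest)
      (t : Int)
    = P ++ (List.replicate t 0 ++ fRow c (bl.drop t) (next.drop t)) :: next :: rest := by
  have hbj : PySem.List.pyGet? bl (t : Int) = some bl[t] := by
    simp [List.getElem?_eq_getElem ht]
  set F' := fRow c (bl.drop (t + 1)) (next.drop (t + 1)) with hF
  set row : List Int := List.replicate (t + 1) 0 ++ F' with hrow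
  set L : List (List Int) := P ++ row :: next :: rest with hL
  have g0 : PySem.List.pyGetD L (P.length : Int) [] = row := by
    rw [hL]
    simp only [PySem.List.pyGetD, PySem.List.pyGet?_append_length, Option.getD_some]
  have g1 : PySem.List.pyGetD L ((P.length : Int) + 1) [] = next := by
    rw [hL, show ((P.length : Int) + 1) = ((P.length : Int) + ((1 : Nat) : Int)) from by norm_num]
    simp only [PySem.List.pyGetD, PySem.List.pyGet?_append_right]
    rfl
  have g2 : PySem.List.pyGetD next ((t : Int) + 1) 0 = (next.drop (t + 1)).headI := by
    rw [show ((t : Int) + 1) = (((t + 1 : Nat)) : Int) from by omega, pyGetD_drop_headI]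
  have g3 : PySem.List.pyGetD next (t : Int) 0 = (next.drop t).headI := pyGetD_drop_headI next t
  have g4 : PySem.List.pyGetD row ((t : Int) + 1) 0 = F'.headI := by
    rw [show ((t : Int) + 1) = (((t + 1 : Nat)) : Int) from by omega, pyGetD_drop_headI,
        hrow, show (List.replicate (t + 1) (0 : Int) ++ F').drop (t + 1) = F' from by simp]
  have hsetrow : ∀ v : Int, PySem.List.pySetD row (t : Int) v = List.replicate t 0 ++ v :: F' := by
    intro v
    rw [PySem.List.pySetD_natCast, hrow, List.replicate_succ', List.append_assoc]
    have h3 := set_append_cons' (List.replicate t (0 : Int)) 0 F' v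
    simp only [List.length_replicate] at h3
    exact h3
  have hsetL : ∀ r : List Int, PySem.List.pySetD L (P.length : Int) r = P ++ r :: next :: rest := by
    intro r
    rw [hL, PySem.List.pySetD_natCast, set_append_cons]
  unfold pvAstep
  rw [g0, g1, g2, g3, g4, hc, hbj]
  simp only [hsetrow, hsetL]
  have hbt : bl.drop t = bl[t] :: bl.drop (t + 1) := List.drop_eq_getElem_cons ht
  have htail : (next.drop t).tail = next.drop (t + 1) := List.tail_drop
  congr 2
  rw [hbt]
  simp only [fRow, htail, ← hF]
  have hcond : (some c == some bl[t]) = (c == bl[t]) := by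
    cases h : c == bl[t] <;> simp_all
  rw [hcond]

theorem inner_inv (c : Char) (al bl : List Char) (next : List Int) (P rest : List (List Int)) (t : Nat)
    (hc : PySem.List.pyGet? al (P.length : Int) = some c)
    (ht : t ≤ bl.length) :
    (PySem.List.pyRange ((t : Int) - 1) (-1) (-1)).foldl (pvAstep al bl (P.length : Int))
      (P ++ (List.replicate t 0 ++ fRow c (bl.drop t) (next.drop t)) :: next :: rest)
    = P ++ fRow c bl next :: next :: rest := by
  induction t with
  | zero =>
    rw [show ((0 : Nat) : Int) - 1 = -1 from by norm_num,
        PySem.List.pyRange_neg_one_eq_nil le_rfl]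
    simp
  | succ t ih =>
    rw [show (((t + 1 : Nat)) : Int) - 1 = (t : Int) from by push_cast; ring,
        PySem.List.pyRange_neg_one_cons (by omega : (-1 : Int) < (t : Int)), List.foldl_cons,
        inner_step c al bl next P rest t hc (by omega)]
    exact ih (by omega)

theorem outer_inv (al bl : List Char) (t : Nat) (ht : t ≤ al.length) :
    (PySem.List.pyRange ((t : Int) - 1) (-1) (-1)).foldl (pvAouter al bl)
      (List.replicate t (List.replicate (bl.length + 1) 0) ++ tblA bl (al.drop t))
    = tblA bl al := by
  induction t with
  | zero =>
    rw [show ((0 : Nat) : Int) - 1 = -1 from by norm_num,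
        PySem.List.pyRange_neg_one_eq_nil le_rfl]
    simp
  | succ t ih =>
    obtain ⟨next, rest, hT⟩ : ∃ nx r, tblA bl (al.drop (t + 1)) = nx :: r := by
      rcases h : tblA bl (al.drop (t + 1)) with _ | ⟨nx, r⟩
      · exact absurd h (tblA_ne_nil bl (al.drop (t + 1)))
      · exact ⟨nx, r, rfl⟩
    have hnext : next.length = bl.length + 1 := by
      have h2 := length_headI_tblA bl (al.drop (t + 1))
      rw [hT] at h2
      simpa using h2
    have htl : t < al.length := by omega
    set zr := List.replicate (bl.length + 1) (0 : Int) with hzrdef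
    have hc : PySem.List.pyGet? al (((List.replicate t zr).length : Nat) : Int) = some al[t] := by
      simp [List.getElem?_eq_getElem htl]
    have hzr : zr = List.replicate bl.length 0
        ++ fRow al[t] (bl.drop bl.length) (next.drop bl.length) := by
      rw [List.drop_length, hzrdef, List.replicate_succ']
      simp [fRow]
    have hrw : List.replicate (t + 1) zr ++ tblA bl (al.drop (t + 1))
        = List.replicate t zr
          ++ (List.replicate bl.length 0
              ++ fRow al[t] (bl.drop bl.length) (next.drop bl.length)) :: next :: rest := by
      rw [← hzr, hT, List.replicate_succ', List.append_assoc]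
      rfl
    have hinner := inner_inv al[t] al bl next (List.replicate t zr) rest bl.length hc le_rfl
    simp only [List.length_replicate] at hinner
    have hdt : al.drop t = al[t] :: al.drop (t + 1) := List.drop_eq_getElem_cons htl
    have hstep : pvAouter al bl (List.replicate (t + 1) zr ++ tblA bl (al.drop (t + 1))) (t : Int)
        = List.replicate t zr ++ tblA bl (al.drop t) := by
      unfold pvAouter
      rw [hrw, hinner, hdt]
      simp only [tblA, hT]
      rfl
    rw [show (((t + 1 : Nat)) : Int) - 1 = (t : Int) from by push_cast; ring,
        PySem.List.pyRange_neg_one_cons (by omega : (-1 : Int) < (t : Int)), List.foldl_cons,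
        hstep]
    exact ih (by omega)

theorem portA_eq_tblA (a b : String) :
    build_suffix_lcs_table a b = tblA b.toList a.toList := by
  unfold build_suffix_lcs_table
  have h0 : List.replicate (a.toList.length + 1) (List.replicate (b.toList.length + 1) (0 : Int))
      = List.replicate a.toList.length (List.replicate (b.toList.length + 1) (0 : Int))
        ++ tblA b.toList (a.toList.drop a.toList.length) := by
    rw [List.drop_length, List.replicate_succ']
    simp [tblA]
  rw [h0]
  exact outer_inv a.toList b.toList a.toList.length le_rfl

-- ===== tblA = spec rows =====

theorem fRow_specRow (c : Char) (al : List Char) : ∀ bl : List Char,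
    fRow c bl (specRow al bl) = specRow (c :: al) bl := by
  intro bl
  induction bl with
  | nil => simp [fRow, specRow, lcsN_nil_right]
  | cons y ys ih =>
    rw [specRow_cons al y ys]
    simp only [fRow, List.tail_cons, List.headI_cons, ih, specRow_headI]
    rw [specRow_cons (c :: al) y ys, lcsN_cons_cons]
    by_cases hcy : c = y
    · simp [hcy]
    · have hb : (c == y) = false := by simp [hcy]
      simp [hb, hcy, Nat.cast_max]

def sRows (bl : List Char) : List Char → List (List Int)
  | [] => [specRow [] bl]
  | c :: al => specRow (c :: al) bl :: sRows bl al

theorem sRows_headI (bl al : List Char) : (sRows bl al).headI = specRow al bl := by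
  cases al <;> rfl

theorem tblA_eq_sRows (bl al : List Char) : tblA bl al = sRows bl al := by
  induction al with
  | nil => simp [tblA, sRows, specRow_nil_left]
  | cons c al ih =>
    show fRow c bl (tblA bl al).headI :: tblA bl al = specRow (c :: al) bl :: sRows bl al
    rw [ih, sRows_headI, fRow_specRow]

-- ===== B port = spec rows =====

theorem brow_step (bl al : List Char) (c : Char) (t : Nat) (ht : t < bl.length) :
    pvBrowStep bl (specRow al bl) c
      (((specRow (c :: al) bl).drop (t + 1)).reverse,
        Option.map (fun v : Nat => (v : Int)) (obestN c al (bl.drop (t + 1)))) (t : Int)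
    = (((specRow (c :: al) bl).drop t).reverse,
        Option.map (fun v : Nat => (v : Int)) (obestN c al (bl.drop t))) := by
  have hbj : PySem.List.pyGet? bl (t : Int) = some bl[t] := by
    simp [List.getElem?_eq_getElem ht]
  have hdt : bl.drop t = bl[t] :: bl.drop (t + 1) := List.drop_eq_getElem_cons ht
  have hg1 : PySem.List.pyGetD (specRow al bl) ((t : Int) + 1) 0
      = ((lcsN al (bl.drop (t + 1)) : Nat) : Int) := by
    rw [show ((t : Int) + 1) = (((t + 1 : Nat)) : Int) from by omega]
    exact specRow_get al bl (t + 1) (by omega)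
  have hg0 : PySem.List.pyGetD (specRow al bl) (t : Int) 0
      = ((lcsN al (bl.drop t) : Nat) : Int) := specRow_get al bl t (by omega)
  have hob : obestN c al (bl.drop t)
      = if bl[t] = c then some (lcsN al (bl.drop (t + 1))) else obestN c al (bl.drop (t + 1)) := by
    rw [hdt, obestN]
  have hspec := entry_spec c al (bl.drop t)
  have hdropS : (specRow (c :: al) bl).drop t
      = ((lcsN (c :: al) (bl.drop t) : Nat) : Int) :: (specRow (c :: al) bl).drop (t + 1) := by
    have hlt : t < (specRow (c :: al) bl).length := by simp [specRow]; omega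
    rw [List.drop_eq_getElem_cons hlt, specRow_getElem (c :: al) bl t (by omega)]
  unfold pvBrowStep
  by_cases hb : bl[t] = c
  · have hcond : (PySem.List.pyGet? bl (t : Int) == some c) = true := by
      rw [hbj]; simp [hb]
    rw [hob, if_pos hb] at hspec
    simp only [Option.elim_some] at hspec
    simp only [hcond, if_true, hg1, hg0, hob, if_pos hb, hdropS, Option.map_some,
      Option.elim_some, List.reverse_cons, Prod.mk.injEq]
    refine ⟨?_, trivial⟩
    have hx : (max ((lcsN al (bl.drop t) : Nat) : Int) (1 + ((lcsN al (bl.drop (t + 1)) : Nat) : Int)))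
        = ((lcsN (c :: al) (bl.drop t) : Nat) : Int) := by
      rw [← hspec]; push_cast; omega
    rw [hx]
  · have hcond : (PySem.List.pyGet? bl (t : Int) == some c) = false := by
      rw [hbj]; simp [hb]
    rw [hob, if_neg hb] at hspec
    simp only [hcond, Bool.false_eq_true, if_false, hg0, hob, if_neg hb, hdropS,
      List.reverse_cons, Prod.mk.injEq]
    refine ⟨?_, trivial⟩
    cases hbe : obestN c al (bl.drop (t + 1)) with
    | none =>
      rw [hbe] at hspec
      simp only [Option.elim_none] at hspec
      simp only [Option.map_none, Option.elim_none]
      rw [← hspec]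
    | some v =>
      rw [hbe] at hspec
      simp only [Option.elim_some] at hspec
      simp only [Option.map_some, Option.elim_some]
      have hx : (max ((lcsN al (bl.drop t) : Nat) : Int) (1 + (v : Int)))
          = ((lcsN (c :: al) (bl.drop t) : Nat) : Int) := by
        rw [← hspec]; push_cast; omega
      rw [hx]

theorem brow_inv (bl al : List Char) (c : Char) : ∀ (j0 : Nat), j0 ≤ bl.length →
    (PySem.List.pyRange ((j0 : Int) - 1) (-1) (-1)).foldl (pvBrowStep bl (specRow al bl) c)
      (((specRow (c :: al) bl).drop j0).reverse,
        Option.map (fun v : Nat => (v : Int)) (obestN c al (bl.drop j0)))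
    = ((specRow (c :: al) bl).reverse,
        Option.map (fun v : Nat => (v : Int)) (obestN c al bl)) := by
  intro j0
  induction j0 with
  | zero =>
    intro _
    rw [show ((0 : Nat) : Int) - 1 = -1 from by norm_num,
        PySem.List.pyRange_neg_one_eq_nil le_rfl]
    simp
  | succ t ih =>
    intro hle
    rw [show (((t + 1 : Nat)) : Int) - 1 = (t : Int) from by push_cast; ring,
        PySem.List.pyRange_neg_one_cons (by omega : (-1 : Int) < (t : Int)), List.foldl_cons,
        brow_step bl al c t (by omega)]
    exact ih (by omega)

theorem pvBrow_spec (bl al : List Char) (c : Char) :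
    pvBrow bl (specRow al bl) c = specRow (c :: al) bl := by
  unfold pvBrow
  have h0 : (((specRow (c :: al) bl).drop bl.length).reverse,
        Option.map (fun v : Nat => (v : Int)) (obestN c al (bl.drop bl.length)))
      = (([(0 : Int)] : List Int), (none : Option Int)) := by
    rw [specRow_drop_len, List.drop_length]
    rfl
  rw [← h0, brow_inv bl al c bl.length le_rfl]
  simp

theorem sRows_shape (bl al : List Char) : ∃ t, sRows bl al = specRow al bl :: t := by
  cases al <;> exact ⟨_, rfl⟩

theorem foldB (bl : List Char) : ∀ (l al : List Char),
    l.foldl (pvBstepB bl) ((sRows bl al).reverse) = (sRows bl (l.reverse ++ al)).reverse := by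
  intro l
  induction l with
  | nil => intro al; simp
  | cons c l ih =>
    intro al
    obtain ⟨t, ht⟩ := sRows_shape bl al
    have hstep : pvBstepB bl ((sRows bl al).reverse) c = (sRows bl (c :: al)).reverse := by
      unfold pvBstepB
      rw [ht, List.reverse_cons, PySem.List.pyGet?_neg_one_append_singleton]
      simp only [Option.getD_some, pvBrow_spec]
      show (t.reverse ++ [specRow al bl]) ++ [specRow (c :: al) bl]
          = (sRows bl (c :: al)).reverse
      show (t.reverse ++ [specRow al bl]) ++ [specRow (c :: al) bl]
          = (specRow (c :: al) bl :: sRows bl al).reverse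
      rw [List.reverse_cons, ht, List.reverse_cons]
    rw [List.foldl_cons, hstep, ih (c :: al)]
    congr 1
    simp

theorem portB_eq_tblA (a b : String) :
    build_suffix_lcs_table_alt a b = tblA b.toList a.toList := by
  unfold build_suffix_lcs_table_alt
  have h0 : [List.replicate (b.toList.length + 1) (0 : Int)] = (sRows b.toList []).reverse := by
    show _ = [specRow [] b.toList].reverse
    rw [specRow_nil_left]
    rfl
  rw [h0, foldB b.toList a.toList.reverse [], tblA_eq_sRows]
  simp

-- ===== VERDICT (by name: the statement is the Claim_ definition above) =====
theorem build_suffix_lcs_table_spec : Claim_equal_build_suffix_lcs_table := by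
  intro a b _
  unfold Spec_build_suffix_lcs_table
  rw [portA_eq_tblA, portB_eq_tblA]
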